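-- pv_equiv track=rewrite | github.com/obukhalov/hacker_rank | Time_Delta.py | month_to_sec
-- ===== SOURCE A (Python) =====
-- def intercalary_year(_year):
--     if _year % 4 != 0 or (_year % 100 == 0 and _year % 400 != 0):
--         return False
--     else:
--         return True
--
-- def month_to_sec(_month, _year):
--     _month_dict = { 'Jan' : 31, 'Feb' : 28, 'Mar' : 31, 'Apr' : 30, 'May' : 31, 'Jun' : 30, 'Jul' : 31, 'Aug' : 31, 'Sep' : 30, 'Oct' : 31, 'Nov' : 30, 'Dec' : 31 }
--     _month_list = [ 'Jan', 'Feb', 'Mar', 'Apr', 'May', 'Jun', 'Jul', 'Aug', 'Sep', 'Oct', 'Nov', 'Dec' ]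
--     _sec = 0
--     for i in range(_month_list.index(_month)):
--         _sec += _month_dict[_month_list[i]] * 86400
--
--     if intercalary_year(_year) and _month_list.index(_month) > 1:
--         return _sec + 86400
--     else:
--         return _sec
-- ===== SOURCE B (Python) =====
-- _MONTHS = ['Jan', 'Feb', 'Mar', 'Apr', 'May', 'Jun', 'Jul', 'Aug', 'Sep', 'Oct', 'Nov', 'Dec']
-- _CUM = [0, 31, 59, 90, 120, 151, 181, 212, 243, 273, 304, 334]
--
-- def month_to_sec(_month, _year):
--     idx = _MONTHS.index(_month)
--     sec = _CUM[idx] * 86400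
--     if idx > 1 and _year % 4 == 0 and (_year % 100 != 0 or _year % 400 == 0):
--         sec += 86400
--     return sec
-- ===== Notes on version B (the rewrite author's own statement) =====
-- stated objective: simpler
-- what changed: Replaces the per-month accumulation loop over the day-count dict with a single lookup into a precomputed cumulative-days prefix table; the leap-day correction and ValueError on unknown months are unchanged.
import Mathlib
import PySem

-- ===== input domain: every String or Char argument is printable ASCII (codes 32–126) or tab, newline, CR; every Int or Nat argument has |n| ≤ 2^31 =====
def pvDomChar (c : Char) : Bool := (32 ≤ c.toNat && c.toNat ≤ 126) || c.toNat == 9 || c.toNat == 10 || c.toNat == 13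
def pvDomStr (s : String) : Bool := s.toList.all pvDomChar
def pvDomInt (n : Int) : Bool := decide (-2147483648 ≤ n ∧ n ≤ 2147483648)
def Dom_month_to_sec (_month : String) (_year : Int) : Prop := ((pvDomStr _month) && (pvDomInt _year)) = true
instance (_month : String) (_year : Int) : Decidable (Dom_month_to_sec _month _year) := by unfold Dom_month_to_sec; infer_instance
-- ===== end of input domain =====

-- B replaces A's per-month accumulation loop with a lookup in a precomputed cumulative-days table (objective: simpler).

-- ===== PORT A =====
def intercalaryYear (_year : Int) : Bool :=
  if PySem.Int.mod _year 4 ≠ 0 ∨ (PySem.Int.mod _year 100 = 0 ∧ PySem.Int.mod _year 400 ≠ 0) then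
    false
  else
    true

def month_to_sec (_month : String) (_year : Int) : Int :=
  let _month_dict : PySem.Dict String Int :=
    PySem.Dict.ofList [("Jan", 31), ("Feb", 28), ("Mar", 31), ("Apr", 30), ("May", 31), ("Jun", 30),
                       ("Jul", 31), ("Aug", 31), ("Sep", 30), ("Oct", 31), ("Nov", 30), ("Dec", 31)]
  let _month_list : List String :=
    ["Jan", "Feb", "Mar", "Apr", "May", "Jun", "Jul", "Aug", "Sep", "Oct", "Nov", "Dec"]
  match PySem.List.index? _month_list _month with
  | none => 0  -- Python raises ValueError here; excluded by Pre_
  | some idx =>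
    let _sec : Int :=
      (PySem.List.pyRange 0 (idx : Int) 1).foldl
        (fun s i => s + _month_dict.getD (PySem.List.pyGetD _month_list i "") 0 * 86400) 0
    if intercalaryYear _year && idx > 1 then _sec + 86400 else _sec

-- ===== PORT B =====
def pvMonthsB : List String :=
  ["Jan", "Feb", "Mar", "Apr", "May", "Jun", "Jul", "Aug", "Sep", "Oct", "Nov", "Dec"]
def pvCumB : List Int := [0, 31, 59, 90, 120, 151, 181, 212, 243, 273, 304, 334]

def month_to_sec_alt (_month : String) (_year : Int) : Int :=
  match PySem.List.index? pvMonthsB _month with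
  | none => 0  -- Python raises ValueError here; excluded by Pre_
  | some idx =>
    let sec := PySem.List.pyGetD pvCumB (idx : Int) 0 * 86400
    if idx > 1 && (PySem.Int.mod _year 4 = 0 &&
        (PySem.Int.mod _year 100 ≠ 0 || PySem.Int.mod _year 400 = 0)) then
      sec + 86400
    else
      sec

-- ===== PRECONDITION & SPEC =====
-- Pre_ excludes month names not in the twelve-element list, on which A raises ValueError (B raises too).
def Pre_month_to_sec (_month : String) (_year : Int) : Prop :=
  _month ∈ (["Jan", "Feb", "Mar", "Apr", "May", "Jun", "Jul", "Aug", "Sep", "Oct", "Nov", "Dec"] : List String)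
instance (_month : String) (_year : Int) : Decidable (Pre_month_to_sec _month _year) := by
  unfold Pre_month_to_sec; infer_instance
def pvWitness_month_to_sec : String × Int := ("Mar", 2000)

def Spec_month_to_sec (_month : String) (_year : Int) (out : Int) : Prop := out = month_to_sec_alt _month _year
instance (_month : String) (_year : Int) (out : Int) : Decidable (Spec_month_to_sec _month _year out) := by unfold Spec_month_to_sec; infer_instance

-- ===== CLAIM (what is proved, stated in full; the proofs are below) =====
def Claim_equal_month_to_sec : Prop := ∀ (_month : String) (_year : Int), Dom_month_to_sec _month _year → Pre_month_to_sec _month _year → Spec_month_to_sec _month _year (month_to_sec _month _year)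

-- ===== LEMMAS AND PROOFS =====

-- A's body with the year's leap-flag abstracted into a Bool parameter.
def pvAcore (_month : String) (b : Bool) : Int :=
  let _month_dict : PySem.Dict String Int :=
    PySem.Dict.ofList [("Jan", 31), ("Feb", 28), ("Mar", 31), ("Apr", 30), ("May", 31), ("Jun", 30),
                       ("Jul", 31), ("Aug", 31), ("Sep", 30), ("Oct", 31), ("Nov", 30), ("Dec", 31)]
  let _month_list : List String :=
    ["Jan", "Feb", "Mar", "Apr", "May", "Jun", "Jul", "Aug", "Sep", "Oct", "Nov", "Dec"]
  match PySem.List.index? _month_list _month with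
  | none => 0
  | some idx =>
    let _sec : Int :=
      (PySem.List.pyRange 0 (idx : Int) 1).foldl
        (fun s i => s + _month_dict.getD (PySem.List.pyGetD _month_list i "") 0 * 86400) 0
    if b && idx > 1 then _sec + 86400 else _sec

-- B's body with its leap condition abstracted into a Bool parameter.
def pvBleap (_year : Int) : Bool :=
  PySem.Int.mod _year 4 = 0 && (PySem.Int.mod _year 100 ≠ 0 || PySem.Int.mod _year 400 = 0)

def pvBcore (_month : String) (b : Bool) : Int :=
  match PySem.List.index? pvMonthsB _month with
  | none => 0
  | some idx =>
    let sec := PySem.List.pyGetD pvCumB (idx : Int) 0 * 86400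
    if idx > 1 && b then sec + 86400 else sec

theorem a_eq_core (m : String) (y : Int) : month_to_sec m y = pvAcore m (intercalaryYear y) := rfl

theorem b_eq_core (m : String) (y : Int) : month_to_sec_alt m y = pvBcore m (pvBleap y) := rfl

-- A's and B's leap-year conditions are De Morgan duals of each other.
theorem leap_cond_eq (y : Int) : intercalaryYear y = pvBleap y := by
  unfold intercalaryYear pvBleap
  by_cases h4 : PySem.Int.mod y 4 = 0 <;>
    by_cases h100 : PySem.Int.mod y 100 = 0 <;>
      by_cases h400 : PySem.Int.mod y 400 = 0 <;>
        simp_all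

-- ===== VERDICT (by name: the statement is the Claim_ definition above) =====
theorem month_to_sec_spec : Claim_equal_month_to_sec := by
  intro m y _ hpre
  unfold Spec_month_to_sec
  rw [a_eq_core, b_eq_core, leap_cond_eq]
  generalize pvBleap y = b
  unfold Pre_month_to_sec at hpre
  fin_cases hpre <;> cases b <;> decide
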